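-- pv_equiv track=rewrite | github.com/JJjermaine/leetcode-solutions | leetcode/2794-maximum-number-of-moves-in-a-grid/2024-10-29_12.28.09_-_Accepted_-_runtime_379ms_-_memory_27.2MB.py | maxMoves
-- ===== SOURCE A (Python) =====
-- from typing import List
--
-- def maxMoves(grid: List[List[int]]) -> int:
--     rows = len(grid)
--     cols = len(grid[0])
--
--     dp_matrix = [[0 for _ in range(cols)] for _ in range(rows)]
--
--     # traverse from lext to right
--     for j in range(1, cols):
--         for i in range(rows):
--             max_moves = 0
--
--             # Move from (i, j-1) if value is greater
--             if grid[i][j] > grid[i][j - 1] and dp_matrix[i][j] != -1: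
--                 max_moves = max(max_moves, dp_matrix[i][j - 1] + 1)
--
--             # Move from (i - 1, j-1) if within bounds and value is greater
--             if i > 0 and grid[i][j] > grid[i - 1][j - 1] and dp_matrix[i][j] != -1:
--                 max_moves = max(max_moves, dp_matrix[i - 1][j - 1] + 1)
--
--             # Move from (i + 1, j-1) if within bounds and value is greater
--             if i < rows - 1 and grid[i][j] > grid[i + 1][j - 1] and dp_matrix[i][j] != -1:
--                 max_moves = max(max_moves, dp_matrix[i + 1][j - 1] + 1)
--
--             # Update the dp_matrix with maximum moves from this cell
--             if max_moves == 0: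
--                 dp_matrix[i][j] = -1
--             else:
--                 dp_matrix[i][j] = max_moves
--
--     return max(max(x) for x in dp_matrix)
-- ===== SOURCE B (Python) =====
-- from typing import List
--
-- def maxMoves(grid: List[List[int]]) -> int:
--     # Frontier scan over columns: keep a boolean vector of rows reachable in the
--     # current column; stop at the first column no row can reach.
--     rows = len(grid)
--     cols = len(grid[0])
--     frontier = [True] * rows
--     for j in range(1, cols):
--         nxt = [
--             any(0 <= p < rows and frontier[p] and grid[p][j - 1] < grid[i][j]
--                 for p in (i - 1, i, i + 1))
--             for i in range(rows)
--         ]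
--         if not any(nxt):
--             return j - 1
--         frontier = nxt
--     return cols - 1
-- ===== Notes on version B (the rewrite author's own statement) =====
-- stated objective: alternative
-- what changed: A fills a full rows*cols dp matrix of per-cell path lengths and then takes a global max; B keeps only a per-column boolean frontier of reachable rows, advancing column by column and returning at the first column no row can reach (same asymptotic cost, O(rows) extra space, early exit on dead columns).
import Mathlib
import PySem

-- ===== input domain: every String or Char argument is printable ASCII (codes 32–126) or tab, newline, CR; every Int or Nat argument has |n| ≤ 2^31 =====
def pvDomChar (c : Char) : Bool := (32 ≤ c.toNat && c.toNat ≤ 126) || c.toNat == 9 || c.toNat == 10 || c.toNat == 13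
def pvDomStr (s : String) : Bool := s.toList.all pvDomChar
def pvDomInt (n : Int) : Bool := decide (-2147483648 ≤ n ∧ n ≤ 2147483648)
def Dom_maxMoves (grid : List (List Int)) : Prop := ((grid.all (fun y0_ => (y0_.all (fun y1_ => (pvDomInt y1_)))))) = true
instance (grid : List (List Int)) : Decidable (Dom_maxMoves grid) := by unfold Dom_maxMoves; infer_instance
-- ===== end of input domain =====

-- B replaces A's full dp matrix with a per-column boolean frontier of reachable rows and an early
-- exit at the first dead column (alternative decomposition: same asymptotic cost, O(rows) extra space, early exit on dead columns).

-- ===== PORT A =====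
-- grid[i][j] (indices known in range under Pre_; default 0 outside)
def pvGet2 (g : List (List Int)) (i j : Int) : Int :=
  PySem.List.pyGetD (PySem.List.pyGetD g i []) j 0

-- body of A's inner loop: the update of dp_matrix at row i, column j
def pvUpd (grid : List (List Int)) (rows : Int) (dp : List (List Int)) (j i : Int) :
    List (List Int) :=
  let m0 : Int := 0
  let m1 := if pvGet2 grid i j > pvGet2 grid i (j - 1) ∧ pvGet2 dp i j ≠ -1 then
      max m0 (pvGet2 dp i (j - 1) + 1) else m0
  let m2 := if i > 0 ∧ pvGet2 grid i j > pvGet2 grid (i - 1) (j - 1) ∧ pvGet2 dp i j ≠ -1 then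
      max m1 (pvGet2 dp (i - 1) (j - 1) + 1) else m1
  let m3 := if i < rows - 1 ∧ pvGet2 grid i j > pvGet2 grid (i + 1) (j - 1) ∧ pvGet2 dp i j ≠ -1 then
      max m2 (pvGet2 dp (i + 1) (j - 1) + 1) else m2
  PySem.List.pySetD dp i
    (PySem.List.pySetD (PySem.List.pyGetD dp i []) j (if m3 = 0 then -1 else m3))

def maxMoves (grid : List (List Int)) : Int :=
  let rows : Int := grid.length
  let cols : Int := (PySem.List.pyGetD grid 0 []).length
  let dp0 : List (List Int) :=
    (PySem.List.pyRange 0 rows).map (fun _ => (PySem.List.pyRange 0 cols).map (fun _ => (0 : Int)))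
  let dp := (PySem.List.pyRange 1 cols).foldl
    (fun dp j => (PySem.List.pyRange 0 rows).foldl (fun dp i => pvUpd grid rows dp j i) dp) dp0
  (PySem.List.max? (dp.map (fun x => (PySem.List.max? x (fun y => y)).getD 0))
      (fun y => y)).getD 0

-- ===== PORT B =====
-- B's own grid read grid[p][q] (indices in range under Pre_; default 0 outside)
def pvGet2B (g : List (List Int)) (i j : Int) : Int :=
  PySem.List.pyGetD (PySem.List.pyGetD g i []) j 0

-- one column step: which rows are reachable in column j, given the frontier of column j-1
def pvAltStep (grid : List (List Int)) (rows : Int) (frontier : List Bool) (j : Int) :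
    List Bool :=
  (PySem.List.pyRange 0 rows).map (fun i =>
    [i - 1, i, i + 1].any (fun p =>
      decide (0 ≤ p) && decide (p < rows) && PySem.List.pyGetD frontier p false &&
        decide (pvGet2B grid p (j - 1) < pvGet2B grid i j)))

def pvAltLoop (grid : List (List Int)) (rows cols : Int) (frontier : List Bool) :
    List Int → Int
  | [] => cols - 1
  | j :: rest =>
    let nxt := pvAltStep grid rows frontier j
    if nxt.any id then pvAltLoop grid rows cols nxt rest else j - 1

def maxMoves_alt (grid : List (List Int)) : Int :=
  let rows : Int := grid.length
  let cols : Int := (PySem.List.pyGetD grid 0 []).length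
  pvAltLoop grid rows cols (List.replicate rows.toNat true) (PySem.List.pyRange 1 cols)

-- ===== PRECONDITION & SPEC =====
-- Pre_ excludes exactly the inputs where the Python A raises: the empty grid / empty first row
-- (IndexError / ValueError on max of an empty row) and, when there are at least two columns,
-- ragged grids with a row shorter than the first (IndexError).
def Pre_maxMoves (grid : List (List Int)) : Prop :=
  0 < (grid.headD []).length ∧
    ((grid.headD []).length = 1 ∨ ∀ row ∈ grid, (grid.headD []).length ≤ row.length)
instance (grid : List (List Int)) : Decidable (Pre_maxMoves grid) := by
  unfold Pre_maxMoves; infer_instance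

def pvWitness_maxMoves : List (List Int) := [[1, 3, 2], [2, 4, 1]]

def Spec_maxMoves (grid : List (List Int)) (out : Int) : Prop := out = maxMoves_alt grid
instance (grid : List (List Int)) (out : Int) : Decidable (Spec_maxMoves grid out) := by
  unfold Spec_maxMoves; infer_instance

-- ===== CLAIM (what is proved, stated in full; the proofs are below) =====
def Claim_equal_maxMoves : Prop :=
  ∀ (grid : List (List Int)), Dom_maxMoves grid → Pre_maxMoves grid →
    Spec_maxMoves grid (maxMoves grid)

-- ===== LEMMAS AND PROOFS =====

-- grid value with Nat indices (default 0, as the ports' defaulting reads)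
def pvVal (grid : List (List Int)) (i k : Nat) : Int := (grid.getD i []).getD k 0

-- can row i be reached in column j by a chain of rightward moves from column 0?
def pvReach (grid : List (List Int)) : Nat → Nat → Bool
  | 0, _ => true
  | k + 1, i =>
    (decide (0 < i) && decide (i - 1 < grid.length) && pvReach grid k (i - 1) &&
        decide (pvVal grid (i - 1) k < pvVal grid i (k + 1)))
    || (decide (i < grid.length) && pvReach grid k i &&
        decide (pvVal grid i k < pvVal grid i (k + 1)))
    || (decide (i + 1 < grid.length) && pvReach grid k (i + 1) &&
        decide (pvVal grid (i + 1) k < pvVal grid i (k + 1)))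

def pvAlive (grid : List (List Int)) (j : Nat) : Bool :=
  (List.range grid.length).any (fun i => pvReach grid j i)

-- the common answer: the furthest column with a reachable row
def pvJ (grid : List (List Int)) : Nat :=
  Nat.findGreatest (fun j => pvAlive grid j = true) ((grid.headD []).length - 1)

-- greatest reachable column within row r's dp entries
def pvJr (grid : List (List Int)) (r : Nat) : Nat :=
  Nat.findGreatest (fun k => pvReach grid k r = true) ((grid.headD []).length - 1)

-- the final value of A's dp cell (r, k), once column k has been processed
def pvCell (grid : List (List Int)) (r k : Nat) : Int :=
  if k = 0 then 0 else if pvReach grid k r then (k : Int) else -1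

-- A's dp matrix after fully processing columns < j and, in column j, rows < i
def pvMid (grid : List (List Int)) (j i : Nat) : List (List Int) :=
  (List.range grid.length).map (fun r =>
    (List.range (grid.headD []).length).map (fun k =>
      if k < j ∨ (k = j ∧ r < i) then pvCell grid r k else 0))

-- B's frontier vector for column j
def pvFvec (grid : List (List Int)) (j : Nat) : List Bool :=
  (List.range grid.length).map (fun i => pvReach grid j i)

-- generic loop invariant for a fold over range(a, b)
lemma pvFoldInv {α : Type} (f : α → Int → α) (g : Nat → α) (a b : Nat) (hab : a ≤ b)
    (h : ∀ k, a ≤ k → k < b → f (g k) (k : Int) = g (k + 1)) :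
    (PySem.List.pyRange (a : Int) (b : Int)).foldl f (g a) = g b := by
  induction b, hab using Nat.le_induction with
  | base => rw [PySem.List.pyRange_one_eq_nil le_rfl]; rfl
  | succ b hb ih =>
    have hcast : ((b + 1 : Nat) : Int) = (b : Int) + 1 := by push_cast; ring
    rw [hcast, PySem.List.pyRange_one_succ_right (by exact_mod_cast hb), List.foldl_append,
      ih (fun k hk1 hk2 => h k hk1 (Nat.lt_succ_of_lt hk2))]
    exact h b hb (Nat.lt_succ_self b)

lemma pvGet2_grid (grid : List (List Int)) (r k : Nat) :
    pvGet2 grid (r : Int) (k : Int) = pvVal grid r k := by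
  simp [pvGet2, pvVal, PySem.List.pyGetD_natCast]

lemma pvHead_eq (grid : List (List Int)) :
    PySem.List.pyGetD grid 0 [] = grid.headD [] := by
  rw [PySem.List.pyGetD_zero]
  cases grid <;> rfl

lemma pvRow_mid (grid : List (List Int)) (j i r : Nat) (hr : r < grid.length) :
    PySem.List.pyGetD (pvMid grid j i) (r : Int) [] =
      (List.range (grid.headD []).length).map (fun k =>
        if k < j ∨ (k = j ∧ r < i) then pvCell grid r k else 0) := by
  unfold pvMid
  rw [PySem.List.pyGetD_natCast, PySem.List.getD_map_range _ _ _ _ hr]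

lemma pvGet2_mid (grid : List (List Int)) (j i r k : Nat) (hr : r < grid.length)
    (hk : k < (grid.headD []).length) :
    pvGet2 (pvMid grid j i) (r : Int) (k : Int) =
      if k < j ∨ (k = j ∧ r < i) then pvCell grid r k else 0 := by
  simp only [pvGet2]
  rw [pvRow_mid grid j i r hr, PySem.List.pyGetD_natCast,
    PySem.List.getD_map_range _ _ _ _ hk]

lemma pvSetMapRange {β : Type} (f : Nat → β) (n j : Nat) (v : β) :
    ((List.range n).map f).set j v =
      (List.range n).map (fun k => if k = j then v else f k) := by
  refine List.ext_getElem (by simp) ?_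
  intro i h1 h2
  rw [List.getElem_set]
  simp only [List.getElem_map, List.getElem_range]
  have hi : i < n := by simpa using h2
  by_cases h : j = i
  · subst h; simp
  · simp only [if_neg h, if_neg (fun hh => h (Eq.symm hh))]

-- writing the freshly computed cell value into the intended matrix advances it by one row
lemma pvSet_mid (grid : List (List Int)) (j i : Nat) (hi : i < grid.length)
    (hjc : j < (grid.headD []).length) (v : Int) (hv : v = pvCell grid i j) :
    PySem.List.pySetD (pvMid grid j i) (i : Int)
      (PySem.List.pySetD (PySem.List.pyGetD (pvMid grid j i) (i : Int) []) (j : Int) v) =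
      pvMid grid j (i + 1) := by
  rw [pvRow_mid grid j i i hi, PySem.List.pySetD_natCast _ j v, pvSetMapRange]
  rw [PySem.List.pySetD_natCast _ i _]
  conv_lhs => rw [pvMid]
  rw [pvSetMapRange]
  unfold pvMid
  apply List.map_congr_left
  intro r hr
  rw [List.mem_range] at hr
  by_cases hri : r = i
  · subst hri
    rw [if_pos rfl]
    apply List.map_congr_left
    intro k hk
    rw [List.mem_range] at hk
    by_cases hkj : k = j
    · subst hkj
      rw [if_pos rfl, if_pos (Or.inr ⟨rfl, by omega⟩), hv]
    · rw [if_neg hkj]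
      exact if_congr (by omega) rfl rfl
  · rw [if_neg hri]
    apply List.map_congr_left
    intro k _
    exact if_congr (by omega) rfl rfl

lemma pvCellSucc (grid : List (List Int)) (p k : Nat) :
    pvCell grid p k + 1 = if pvReach grid k p then ((k : Int) + 1) else 0 := by
  unfold pvCell
  cases k with
  | zero => simp [pvReach]
  | succ m =>
    split_ifs with h1 h2 <;> first
      | omega
      | (exfalso; omega)

-- the crux: one execution of A's inner-loop body advances the intended matrix by one row
lemma pvUpd_mid (grid : List (List Int)) (j i : Nat) (hj : 1 ≤ j)
    (hjc : j < (grid.headD []).length) (hi : i < grid.length) :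
    pvUpd grid (grid.length : Int) (pvMid grid j i) (j : Int) (i : Int) =
      pvMid grid j (i + 1) := by
  obtain ⟨jm, rfl⟩ : ∃ jm, j = jm + 1 := ⟨j - 1, by omega⟩
  have hj1c : ((jm + 1 : Nat) : Int) - 1 = (jm : Int) := by push_cast; ring
  have hci1 : (i : Int) + 1 = ((i + 1 : Nat) : Int) := by push_cast; ring
  simp only [pvUpd, gt_iff_lt]
  rw [hj1c, hci1]
  rw [pvGet2_mid grid (jm+1) i i (jm+1) hi hjc,
    if_neg (show ¬(jm+1 < jm+1 ∨ (jm+1 = jm+1 ∧ i < i)) by omega)]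
  apply pvSet_mid grid (jm+1) i hi hjc
  rw [pvGet2_mid grid (jm+1) i i jm hi (by omega),
    if_pos (show (jm < jm+1 ∨ (jm = jm+1 ∧ i < i)) from Or.inl (by omega)),
    pvGet2_grid grid i (jm+1), pvGet2_grid grid i jm, pvCellSucc grid i jm]
  by_cases h0 : 0 < i <;> by_cases h2 : i + 1 < grid.length
  · have hcim : (i : Int) - 1 = ((i - 1 : Nat) : Int) := by omega
    rw [hcim, pvGet2_mid grid (jm+1) i (i-1) jm (by omega) (by omega),
      if_pos (show (jm < jm+1 ∨ (jm = jm+1 ∧ i-1 < i)) from Or.inl (by omega)),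
      pvGet2_grid grid (i-1) jm, pvCellSucc grid (i-1) jm]
    rw [pvGet2_mid grid (jm+1) i (i+1) jm h2 (by omega),
      if_pos (show (jm < jm+1 ∨ (jm = jm+1 ∧ i+1 < i)) from Or.inl (by omega)),
      pvGet2_grid grid (i+1) jm, pvCellSucc grid (i+1) jm]
    rw [pvCell, if_neg (show ¬(jm + 1 = 0) by omega)]
    simp only [pvReach]
    have e0 : ((0:Int) < (i:Int)) ↔ (0 < i) := by omega
    have e2 : ((i:Int) < (grid.length:Int) - 1) ↔ (i + 1 < grid.length) := by omega
    have ec : ((jm + 1 : Nat) : Int) = (jm : Int) + 1 := by push_cast; ring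
    by_cases hr1 : pvReach grid jm i = true <;> by_cases hr2 : pvReach grid jm (i-1) = true <;>
      by_cases hr3 : pvReach grid jm (i+1) = true <;>
      simp [hr1, hr2, hr3, e0, e2, ec, h0, h2, hi, Nat.le_of_lt hi,
        show i - 1 < grid.length by omega] <;>
      split_ifs <;> omega
  · have hcim : (i : Int) - 1 = ((i - 1 : Nat) : Int) := by omega
    rw [hcim, pvGet2_mid grid (jm+1) i (i-1) jm (by omega) (by omega),
      if_pos (show (jm < jm+1 ∨ (jm = jm+1 ∧ i-1 < i)) from Or.inl (by omega)),
      pvGet2_grid grid (i-1) jm, pvCellSucc grid (i-1) jm]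
    rw [pvCell, if_neg (show ¬(jm + 1 = 0) by omega)]
    simp only [pvReach]
    have e0 : ((0:Int) < (i:Int)) ↔ (0 < i) := by omega
    have e2 : ((i:Int) < (grid.length:Int) - 1) ↔ (i + 1 < grid.length) := by omega
    have ec : ((jm + 1 : Nat) : Int) = (jm : Int) + 1 := by push_cast; ring
    by_cases hr1 : pvReach grid jm i = true <;> by_cases hr2 : pvReach grid jm (i-1) = true <;>
      by_cases hr3 : pvReach grid jm (i+1) = true <;>
      simp [hr1, hr2, hr3, e0, e2, ec, h0, h2, hi, Nat.le_of_lt hi,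
        show i - 1 < grid.length by omega] <;>
      split_ifs <;> omega
  · rw [pvGet2_mid grid (jm+1) i (i+1) jm h2 (by omega),
      if_pos (show (jm < jm+1 ∨ (jm = jm+1 ∧ i+1 < i)) from Or.inl (by omega)),
      pvGet2_grid grid (i+1) jm, pvCellSucc grid (i+1) jm]
    rw [pvCell, if_neg (show ¬(jm + 1 = 0) by omega)]
    simp only [pvReach]
    have e0 : ((0:Int) < (i:Int)) ↔ (0 < i) := by omega
    have e2 : ((i:Int) < (grid.length:Int) - 1) ↔ (i + 1 < grid.length) := by omega
    have ec : ((jm + 1 : Nat) : Int) = (jm : Int) + 1 := by push_cast; ring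
    by_cases hr1 : pvReach grid jm i = true <;> by_cases hr2 : pvReach grid jm (i-1) = true <;>
      by_cases hr3 : pvReach grid jm (i+1) = true <;>
      simp [hr1, hr2, hr3, e0, e2, ec, h0, h2, hi, Nat.le_of_lt hi,
        show i - 1 < grid.length by omega] <;>
      split_ifs <;> omega
  · rw [pvCell, if_neg (show ¬(jm + 1 = 0) by omega)]
    simp only [pvReach]
    have e0 : ((0:Int) < (i:Int)) ↔ (0 < i) := by omega
    have e2 : ((i:Int) < (grid.length:Int) - 1) ↔ (i + 1 < grid.length) := by omega
    have ec : ((jm + 1 : Nat) : Int) = (jm : Int) + 1 := by push_cast; ring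
    by_cases hr1 : pvReach grid jm i = true <;> by_cases hr2 : pvReach grid jm (i-1) = true <;>
      by_cases hr3 : pvReach grid jm (i+1) = true <;>
      simp [hr1, hr2, hr3, e0, e2, ec, h0, h2, hi, Nat.le_of_lt hi,
        show i - 1 < grid.length by omega] <;>
      split_ifs <;> omega

lemma pvMid_roll (grid : List (List Int)) (j : Nat) :
    pvMid grid j grid.length = pvMid grid (j + 1) 0 := by
  unfold pvMid
  apply List.map_congr_left
  intro r hr
  rw [List.mem_range] at hr
  apply List.map_congr_left
  intro k _
  have : (k < j ∨ (k = j ∧ r < grid.length)) ↔ (k < j + 1 ∨ (k = j + 1 ∧ r < 0)) := by omega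
  exact if_congr this rfl rfl

-- monotone deadness: once a column is unreachable, so are all later ones
lemma pvAlive_antitone (grid : List (List Int)) (j k : Nat) (hjk : j ≤ k)
    (hk : pvAlive grid k = true) : pvAlive grid j = true := by
  induction k with
  | zero =>
    have : j = 0 := by omega
    exact this ▸ hk
  | succ k ih =>
    rcases Nat.eq_or_lt_of_le hjk with h | h
    · exact h ▸ hk
    · apply ih (by omega)
      unfold pvAlive at hk ⊢
      rw [List.any_eq_true] at hk ⊢
      obtain ⟨i, hi, hr⟩ := hk
      rw [List.mem_range] at hi
      simp only [pvReach, Bool.or_eq_true, Bool.and_eq_true, decide_eq_true_eq] at hr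
      rcases hr with (⟨⟨⟨_, hb⟩, hre⟩, _⟩ | ⟨⟨_, hre⟩, _⟩) | ⟨⟨hb, hre⟩, _⟩
      · exact ⟨i - 1, List.mem_range.mpr hb, hre⟩
      · exact ⟨i, List.mem_range.mpr hi, hre⟩
      · exact ⟨i + 1, List.mem_range.mpr hb, hre⟩

lemma pvAlive_zero (grid : List (List Int)) (hn : 0 < grid.length) :
    pvAlive grid 0 = true := by
  unfold pvAlive
  rw [List.any_eq_true]
  exact ⟨0, by simpa using hn, rfl⟩

lemma pvMax?_getD_eq (L : List Int) (m : Int) (hm : m ∈ L) (hall : ∀ x ∈ L, x ≤ m) :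
    (PySem.List.max? L (fun y => y)).getD 0 = m := by
  cases h : PySem.List.max? L (fun y => y) with
  | none =>
    rw [(PySem.List.max?_eq_none_iff L fun y => y).mp h] at hm
    exact absurd hm (List.not_mem_nil)
  | some m' =>
    have h1 := PySem.List.max?_isMax h m hm
    have h2 := hall m' (PySem.List.max?_mem h)
    simpa using le_antisymm h2 h1

-- row r's max of final dp entries is its greatest reachable column
lemma pvReach_pvJr (grid : List (List Int)) (r : Nat) :
    pvReach grid (pvJr grid r) r = true :=
  Nat.findGreatest_spec (P := fun k => pvReach grid k r = true) (m := 0) (Nat.zero_le _) rfl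

lemma pvRowMax (grid : List (List Int)) (r : Nat) (hc : 0 < (grid.headD []).length) :
    (PySem.List.max? ((List.range (grid.headD []).length).map (fun k => pvCell grid r k))
        (fun y => y)).getD 0 = (pvJr grid r : Int) := by
  apply pvMax?_getD_eq
  · have hlt : pvJr grid r < (grid.headD []).length := by
      have := Nat.findGreatest_le (P := fun k => pvReach grid k r = true)
        ((grid.headD []).length - 1)
      unfold pvJr
      omega
    have hcell : pvCell grid r (pvJr grid r) = (pvJr grid r : Int) := by
      unfold pvCell
      split_ifs with h1 h2
      · simp [h1]
      · rfl
      · exact absurd (pvReach_pvJr grid r) h2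
    rw [← hcell]
    exact List.mem_map_of_mem (List.mem_range.mpr hlt)
  · intro x hx
    rw [List.mem_map] at hx
    obtain ⟨k, hk, hxk⟩ := hx
    rw [List.mem_range] at hk
    subst hxk
    unfold pvCell
    split_ifs with h1 h2
    · positivity
    · exact_mod_cast Nat.le_findGreatest (by omega) h2
    · have : (0:Int) ≤ (pvJr grid r : Int) := by positivity
      omega

lemma pvAlive_of_reach (grid : List (List Int)) (j r : Nat) (hr : r < grid.length)
    (h : pvReach grid j r = true) : pvAlive grid j = true := by
  unfold pvAlive
  rw [List.any_eq_true]
  exact ⟨r, List.mem_range.mpr hr, h⟩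

lemma pvJr_le_pvJ (grid : List (List Int)) (r : Nat) (hr : r < grid.length) :
    pvJr grid r ≤ pvJ grid :=
  Nat.le_findGreatest (Nat.findGreatest_le _)
    (pvAlive_of_reach grid _ r hr (pvReach_pvJr grid r))

-- A's final max over the final dp matrix is the furthest reachable column
lemma pvFinalMax (grid : List (List Int)) (hc : 0 < (grid.headD []).length)
    (hn : 0 < grid.length) :
    (PySem.List.max? ((pvMid grid (grid.headD []).length 0).map
        (fun x => (PySem.List.max? x (fun y => y)).getD 0)) (fun y => y)).getD 0 =
      (pvJ grid : Int) := by
  have hmid : (pvMid grid (grid.headD []).length 0).map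
      (fun x => (PySem.List.max? x (fun y => y)).getD 0) =
      (List.range grid.length).map (fun r => (pvJr grid r : Int)) := by
    unfold pvMid
    rw [List.map_map]
    apply List.map_congr_left
    intro r hr
    rw [List.mem_range] at hr
    simp only [Function.comp]
    have hrow : ((List.range (grid.headD []).length).map (fun k =>
        if k < (grid.headD []).length ∨ (k = (grid.headD []).length ∧ r < 0)
        then pvCell grid r k else 0)) = (List.range (grid.headD []).length).map
          (fun k => pvCell grid r k) := by
      apply List.map_congr_left
      intro k hk
      rw [List.mem_range] at hk
      rw [if_pos (Or.inl hk)]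
    rw [hrow, pvRowMax grid r hc]
  rw [hmid]
  have haJ : pvAlive grid (pvJ grid) = true :=
    Nat.findGreatest_spec (P := fun j => pvAlive grid j = true) (m := 0) (Nat.zero_le _)
      (pvAlive_zero grid hn)
  apply pvMax?_getD_eq
  · unfold pvAlive at haJ
    rw [List.any_eq_true] at haJ
    obtain ⟨r, hr, hre⟩ := haJ
    rw [List.mem_range] at hr
    have h1 : pvJ grid ≤ pvJr grid r :=
      Nat.le_findGreatest (Nat.findGreatest_le _) hre
    have h2 := pvJr_le_pvJ grid r hr
    have : pvJr grid r = pvJ grid := by omega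
    rw [← this]
    exact List.mem_map_of_mem (List.mem_range.mpr hr)
  · intro x hx
    rw [List.mem_map] at hx
    obtain ⟨r, hr, hxr⟩ := hx
    rw [List.mem_range] at hr
    subst hxr
    exact_mod_cast pvJr_le_pvJ grid r hr

lemma maxMoves_eq_pvJ (grid : List (List Int)) (hc : 0 < (grid.headD []).length) :
    maxMoves grid = (pvJ grid : Int) := by
  have hn : 0 < grid.length := by
    cases grid with
    | nil => simp at hc
    | cons a l => simp
  simp only [maxMoves]
  rw [pvHead_eq]
  have hdp0 : ((PySem.List.pyRange 0 (grid.length : Int)).map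
      (fun _ => (PySem.List.pyRange 0 (((grid.headD []).length : Int))).map
        (fun _ => (0 : Int)))) = pvMid grid 1 0 := by
    rw [PySem.List.pyRange_zero_nat, PySem.List.pyRange_zero_nat, List.map_map]
    unfold pvMid
    apply List.map_congr_left
    intro r _
    simp only [Function.comp, List.map_map]
    apply List.map_congr_left
    intro k _
    simp only [Function.comp]
    by_cases hk : k = 0
    · subst hk
      rw [if_pos (Or.inl (by omega))]
      simp [pvCell]
    · rw [if_neg (by omega)]
  rw [hdp0]
  have houter : (PySem.List.pyRange ((1 : Nat) : Int) (((grid.headD []).length : Nat) : Int)).foldl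
      (fun dp j => (PySem.List.pyRange 0 (grid.length : Int)).foldl
        (fun dp i => pvUpd grid (grid.length : Int) dp j i) dp) (pvMid grid 1 0) =
      pvMid grid (grid.headD []).length 0 := by
    apply pvFoldInv _ (fun j => pvMid grid j 0) 1 (grid.headD []).length hc
    intro k hk1 hk2
    have hinner : (PySem.List.pyRange ((0 : Nat) : Int) ((grid.length : Nat) : Int)).foldl
        (fun dp i => pvUpd grid (grid.length : Int) dp (k : Int) i) (pvMid grid k 0) =
        pvMid grid k grid.length := by
      apply pvFoldInv _ (fun i => pvMid grid k i) 0 grid.length (Nat.zero_le _)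
      intro r _ hr
      exact pvUpd_mid grid k r hk1 hk2 hr
    have hinner' : (PySem.List.pyRange 0 (grid.length : Int)).foldl
        (fun dp i => pvUpd grid (grid.length : Int) dp (k : Int) i) (pvMid grid k 0) =
        pvMid grid k grid.length := by
      simpa using hinner
    rw [hinner', pvMid_roll]
  have houter' : (PySem.List.pyRange 1 (((grid.headD []).length : Nat) : Int)).foldl
      (fun dp j => (PySem.List.pyRange 0 (grid.length : Int)).foldl
        (fun dp i => pvUpd grid (grid.length : Int) dp j i) dp) (pvMid grid 1 0) =
      pvMid grid (grid.headD []).length 0 := by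
    simpa using houter
  rw [houter']
  exact pvFinalMax grid hc hn

-- B-side lemmas
lemma pvGetFvec (grid : List (List Int)) (j p : Nat) (hp : p < grid.length) :
    PySem.List.pyGetD (pvFvec grid j) (p : Int) false = pvReach grid j p := by
  unfold pvFvec
  rw [PySem.List.pyGetD_natCast, PySem.List.getD_map_range _ _ _ _ hp]

lemma pvAltStep_fvec (grid : List (List Int)) (j : Nat) :
    pvAltStep grid (grid.length : Int) (pvFvec grid j) ((j : Int) + 1) =
      pvFvec grid (j + 1) := by
  unfold pvAltStep
  simp only [show pvGet2B = pvGet2 from rfl]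
  conv_rhs => unfold pvFvec
  rw [PySem.List.pyRange_zero_nat, List.map_map]
  apply List.map_congr_left
  intro i hi
  rw [List.mem_range] at hi
  simp only [Function.comp]
  have hj1 : ((j : Int) + 1 - 1) = (j : Int) := by ring
  rw [List.any_cons, List.any_cons, List.any_cons, List.any_nil, Bool.or_false]
  -- three candidate predecessors
  have hself : (decide (0 ≤ (i:Int)) && decide ((i:Int) < (grid.length:Int)) &&
      PySem.List.pyGetD (pvFvec grid j) (i:Int) false &&
      decide (pvGet2 grid (i:Int) ((j:Int) + 1 - 1) < pvGet2 grid (i:Int) ((j:Int)+1))) =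
      (decide (i < grid.length) && pvReach grid j i &&
        decide (pvVal grid i j < pvVal grid i (j + 1))) := by
    rw [hj1, pvGetFvec grid j i hi, pvGet2_grid]
    have : pvGet2 grid (i:Int) ((j:Int)+1) = pvVal grid i (j+1) := by
      have : ((j:Int)+1) = ((j+1 : Nat) : Int) := by push_cast; ring
      rw [this, pvGet2_grid]
    rw [this]
    simp [hi]
  have hup : (decide (0 ≤ (i:Int) - 1) && decide ((i:Int) - 1 < (grid.length:Int)) &&
      PySem.List.pyGetD (pvFvec grid j) ((i:Int) - 1) false &&
      decide (pvGet2 grid ((i:Int) - 1) ((j:Int) + 1 - 1) < pvGet2 grid (i:Int) ((j:Int)+1))) =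
      (decide (0 < i) && decide (i - 1 < grid.length) && pvReach grid j (i - 1) &&
        decide (pvVal grid (i - 1) j < pvVal grid i (j + 1))) := by
    by_cases h0 : 0 < i
    · have hc1 : ((i:Int) - 1) = ((i - 1 : Nat) : Int) := by push_cast [h0]; omega
      have hc2 : ((j:Int)+1) = ((j+1 : Nat) : Int) := by push_cast; ring
      rw [hj1, hc1, hc2, pvGetFvec grid j (i-1) (by omega), pvGet2_grid, pvGet2_grid]
      cases hre : pvReach grid j (i - 1) <;>
        simp [hre, h0, hi, Nat.le_of_lt hi, show i - 1 < grid.length by omega]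
        <;> omega
    · have h0' : i = 0 := by omega
      subst h0'
      simp
  have hdown : (decide (0 ≤ (i:Int) + 1) && decide ((i:Int) + 1 < (grid.length:Int)) &&
      PySem.List.pyGetD (pvFvec grid j) ((i:Int) + 1) false &&
      decide (pvGet2 grid ((i:Int) + 1) ((j:Int) + 1 - 1) < pvGet2 grid (i:Int) ((j:Int)+1))) =
      (decide (i + 1 < grid.length) && pvReach grid j (i + 1) &&
        decide (pvVal grid (i + 1) j < pvVal grid i (j + 1))) := by
    have hc1 : ((i:Int) + 1) = ((i + 1 : Nat) : Int) := by push_cast; ring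
    have hc2 : ((j:Int)+1) = ((j+1 : Nat) : Int) := by push_cast; ring
    by_cases h1 : i + 1 < grid.length
    · rw [hj1, hc1, hc2, pvGetFvec grid j (i+1) h1, pvGet2_grid, pvGet2_grid]
      cases hre : pvReach grid j (i + 1) <;> simp [hre, h1] <;> omega
    · have : ¬ ((i:Int) + 1 < (grid.length:Int)) := by exact_mod_cast h1
      simp [h1, this]
  rw [hup, hself, hdown]
  show _ = pvReach grid (j+1) i
  simp only [pvReach, Bool.or_assoc]

lemma pvAny_fvec (grid : List (List Int)) (j : Nat) :
    (pvFvec grid j).any id = pvAlive grid j := by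
  unfold pvFvec pvAlive
  rw [List.any_map]
  rfl

lemma pvJ_of_dead (grid : List (List Int)) (hn : 0 < grid.length) (j : Nat)
    (hj1 : 1 ≤ j) (hjc : j ≤ (grid.headD []).length)
    (ha : pvAlive grid (j - 1) = true) (hd : pvAlive grid j = false) :
    pvJ grid = j - 1 := by
  apply le_antisymm
  · by_contra h
    push Not at h
    have hspec : pvAlive grid (pvJ grid) = true :=
      Nat.findGreatest_spec (P := fun k => pvAlive grid k = true) (m := 0) (Nat.zero_le _)
        (pvAlive_zero grid hn)
    have := pvAlive_antitone grid j (pvJ grid) (by omega) hspec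
    rw [hd] at this
    exact absurd this (by simp)
  · exact Nat.le_findGreatest (by omega) ha

lemma pvAltLoop_eq (grid : List (List Int)) (hn : 0 < grid.length)
    (hc : 0 < (grid.headD []).length) (j : Nat) (hj1 : 1 ≤ j)
    (hjc : j ≤ (grid.headD []).length) (ha : pvAlive grid (j - 1) = true) :
    pvAltLoop grid (grid.length : Int) ((grid.headD []).length : Int) (pvFvec grid (j - 1))
      (PySem.List.pyRange (j : Int) ((grid.headD []).length : Int)) = (pvJ grid : Int) := by
  have hfuel : (grid.headD []).length - j < (grid.headD []).length + 1 - j := by omega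
  generalize hf : (grid.headD []).length - j = fuel
  induction fuel generalizing j with
  | zero =>
    have hjeq : j = (grid.headD []).length := by omega
    subst hjeq
    rw [PySem.List.pyRange_one_eq_nil le_rfl]
    simp only [pvAltLoop]
    have : pvJ grid = (grid.headD []).length - 1 := by
      apply le_antisymm (Nat.findGreatest_le _)
      exact Nat.le_findGreatest le_rfl ha
    rw [this]
    push_cast
    omega
  | succ fuel ih =>
    have hjlt : j < (grid.headD []).length := by omega
    rw [PySem.List.pyRange_one_cons (by exact_mod_cast hjlt)]
    simp only [pvAltLoop]
    have hstep : pvAltStep grid (grid.length : Int) (pvFvec grid (j - 1)) (j : Int) =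
        pvFvec grid j := by
      have h1 : (j : Int) = ((j - 1 : Nat) : Int) + 1 := by push_cast; omega
      rw [h1, pvAltStep_fvec grid (j - 1)]
      congr 1
      omega
    rw [hstep, pvAny_fvec]
    by_cases hal : pvAlive grid j = true
    · rw [if_pos hal]
      have h2 : ((j : Int) + 1) = ((j + 1 : Nat) : Int) := by push_cast; ring
      rw [h2]
      have := ih (j + 1) (by omega) (by omega) (by simpa using hal) (by omega) (by omega)
      simpa using this
    · rw [if_neg (by simpa using hal)]
      rw [pvJ_of_dead grid hn j hj1 (by omega) ha (by simpa using hal)]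
      push_cast
      omega

lemma maxMoves_alt_eq_pvJ (grid : List (List Int)) (hc : 0 < (grid.headD []).length) :
    maxMoves_alt grid = (pvJ grid : Int) := by
  have hn : 0 < grid.length := by
    cases grid with
    | nil => simp at hc
    | cons a l => simp
  simp only [maxMoves_alt]
  rw [pvHead_eq]
  have hrep : List.replicate (grid.length : Int).toNat true = pvFvec grid 0 := by
    unfold pvFvec
    rw [Int.toNat_natCast]
    rw [show (fun i => pvReach grid 0 i) = (Function.const Nat true) from rfl, List.map_const,
      List.length_range]
  rw [hrep]
  have := pvAltLoop_eq grid hn hc 1 le_rfl (by omega) (by simpa using pvAlive_zero grid hn)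
  simpa using this

-- ===== VERDICT (by name: the statement is the Claim_ definition above) =====
theorem maxMoves_spec : Claim_equal_maxMoves := by
  intro grid _ hpre
  have hc := hpre.1
  unfold Spec_maxMoves
  rw [maxMoves_eq_pvJ grid hc, maxMoves_alt_eq_pvJ grid hc]
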